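-- pv_equiv track=rewrite | github.com/syaheer-altaf/rag_4_cpr | solutions/id78.py | partition_function
-- ===== SOURCE A (Python) =====
-- def pentagonal_number(k):
--     return k * (3 * k - 1) // 2
--
-- def partition_function(limit, modulus):
--     partitions = [1]
--     n = 1
--     while True:
--         partitions.append(0)
--         k = 1
--         while True:
--             pentagonal = pentagonal_number(k)
--             if pentagonal > n:
--                 break
--             sign = -1 if (k % 2 == 0) else 1
--             partitions[n] += sign * partitions[n - pentagonal]
--             partitions[n] %= modulus
--             k += 1
--         k = -1
--         while True:
--             pentagonal = pentagonal_number(k)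
--             if pentagonal > n:
--                 break
--             sign = -1 if (k % 2 == 0) else 1
--             partitions[n] += sign * partitions[n - pentagonal]
--             partitions[n] %= modulus
--             k -= 1
--         if partitions[n] == 0:
--             return n
--         n += 1
-- ===== SOURCE B (Python) =====
-- def partition_function(limit, modulus):
--     # B: push-style sieve over a bounded horizon with doubling.  Instead of
--     # gathering p(n-g) terms per n, each finished residue is scattered forward
--     # into the future slots it contributes to; contrib[n] then already holds
--     # the whole pentagonal sum when the scan reaches n.
--     N = 16
--     while True:
--         contrib = [0] * (N + 1)
--         for m in range(0, N + 1):
--             if m == 0: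
--                 p = 1
--             else:
--                 p = contrib[m] % modulus
--                 if p == 0:
--                     return m
--             # scatter sp = (-1)^(k+1) * p into contrib[m+g] for every
--             # generalized pentagonal offset g <= N - m, walking the pairs
--             # g(k) = k(3k-1)/2 and g(k)+k via g(k+1) = g(k) + 3k + 1
--             bound = N - m
--             k = 1
--             g = 1
--             sp = p
--             while g <= bound:
--                 contrib[m + g] += sp
--                 h = g + k
--                 if h <= bound:
--                     contrib[m + h] += sp
--                 g += 3 * k + 1
--                 k += 1
--                 sp = -sp
--         N *= 2
-- ===== Notes on version B (the rewrite author's own statement) =====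
-- stated objective: alternative
-- what changed: B replaces A's per-n gather of pentagonal-recurrence terms (two inner while-loops reading partitions[n-g]) by a push-style sieve over a bounded horizon that is doubled until a zero residue appears: each finished residue is scattered forward into contrib[m+g] for every generalized pentagonal offset g (walked incrementally as g += 3k+1 with alternating sign), so the scan reads each complete sum from one array slot; same modulo semantics, scan starts at 1.
import Mathlib
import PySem

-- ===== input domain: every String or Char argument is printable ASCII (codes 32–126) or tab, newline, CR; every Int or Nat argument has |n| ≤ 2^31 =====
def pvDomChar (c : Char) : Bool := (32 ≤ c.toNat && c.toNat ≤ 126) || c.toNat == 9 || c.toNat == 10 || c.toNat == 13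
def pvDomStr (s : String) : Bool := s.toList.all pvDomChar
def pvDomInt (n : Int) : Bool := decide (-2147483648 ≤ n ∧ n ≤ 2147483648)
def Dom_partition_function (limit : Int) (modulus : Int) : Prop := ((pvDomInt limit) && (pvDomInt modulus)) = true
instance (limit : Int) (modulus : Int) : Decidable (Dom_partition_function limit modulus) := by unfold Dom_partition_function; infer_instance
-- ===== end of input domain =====

-- B replaces A's per-n gather of pentagonal terms by a push-style sieve over a bounded horizon
-- (doubled on a miss): each finished residue is scattered forward into the slots it contributes to
-- (objective: alternative, same asymptotics); equivalence is about the return value only.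
-- Both ports bound their unbounded outer search by fuel (a totality guard only), aligned so that
-- both scan exactly the indices 1 .. 16·2^23 = 134217728 before giving up.

-- ===== PORT A =====
def pentagonal_number (k : Int) : Int := PySem.Int.floordiv (k * (3 * k - 1)) 2

-- positive-k inner while loop of A; `partitions[n - pentagonal]` has 0 ≤ n - pentagonal < |parts|
-- whenever parts holds entries 0..n-1 (so getD with a .toNat index is exact there)
def pvA_loop1 (modulus n : Int) (parts : List Int) : Int → Int → Nat → Int
  | _, acc, 0 => acc
  | k, acc, fuel+1 =>
    let pent := pentagonal_number k
    if pent > n then acc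
    else
      let sign : Int := if PySem.Int.mod k 2 = 0 then -1 else 1
      pvA_loop1 modulus n parts (k + 1)
        (PySem.Int.mod (acc + sign * parts.getD (n - pent).toNat 0) modulus) fuel

-- negative-k inner while loop of A
def pvA_loop2 (modulus n : Int) (parts : List Int) : Int → Int → Nat → Int
  | _, acc, 0 => acc
  | k, acc, fuel+1 =>
    let pent := pentagonal_number k
    if pent > n then acc
    else
      let sign : Int := if PySem.Int.mod k 2 = 0 then -1 else 1
      pvA_loop2 modulus n parts (k - 1)
        (PySem.Int.mod (acc + sign * parts.getD (n - pent).toNat 0) modulus) fuel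

-- outer `while True` of A (fuel-bounded; each inner loop exits by k steps since pentagonal k ≥ |k|)
def pvA_main (modulus : Int) : List Int → Int → Nat → Int
  | _, _, 0 => -1
  | parts, n, fuel+1 =>
    let a1 := pvA_loop1 modulus n parts 1 0 (n.toNat + 2)
    let a2 := pvA_loop2 modulus n parts (-1) a1 (n.toNat + 2)
    if a2 = 0 then n else pvA_main modulus (parts ++ [a2]) (n + 1) fuel

def partition_function (limit : Int) (modulus : Int) : Int :=
  pvA_main modulus [1] 1 134217728

-- ===== PORT B =====
-- B's inner scatter loop: walk the generalized pentagonal pairs (g, g+k) incrementally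
-- (g += 3k+1, sign sp flips each k), adding sp into contrib[m+g] while g ≤ bound
def pvB_scat (bound : Int) (m : Nat) : Int → Int → Int → List Int → Nat → List Int
  | _, _, _, c, 0 => c
  | k, g, sp, c, fuel+1 =>
    if g > bound then c
    else
      let c1 := c.set (m + g.toNat) (c.getD (m + g.toNat) 0 + sp)
      let h := g + k
      let c2 := if h ≤ bound then c1.set (m + h.toNat) (c1.getD (m + h.toNat) 0 + sp) else c1
      pvB_scat bound m (k + 1) (g + 3 * k + 1) (-sp) c2 fuel

-- `for m in range(0, N+1)` scan of one horizon (fuel N+2 covers all N+1 positions)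
def pvB_pass (N : Nat) (modulus : Int) : Nat → List Int → Nat → Option Int
  | _, _, 0 => none
  | m, c, fuel+1 =>
    if m > N then none
    else
      let p := if m = 0 then 1 else PySem.Int.mod (c.getD m 0) modulus
      if m ≠ 0 ∧ p = 0 then some (m : Int)
      else pvB_pass N modulus (m + 1) (pvB_scat ((N : Int) - (m : Int)) m 1 1 p c (N + 2)) fuel

-- outer `while True` of B: try horizon N, on a miss double it (fuel-bounded)
def pvB_main (modulus : Int) : Nat → Nat → Int
  | _, 0 => -1
  | N, fuel+1 =>
    match pvB_pass N modulus 0 (List.replicate (N + 1) 0) (N + 2) with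
    | some z => z
    | none => pvB_main modulus (2 * N) fuel

def partition_function_alt (limit : Int) (modulus : Int) : Int :=
  pvB_main modulus 16 24

-- ===== PRECONDITION & SPEC =====
-- Pre_ excludes exactly modulus = 0, where the Python A raises ZeroDivisionError at `partitions[n] %= modulus`.
def Pre_partition_function (limit : Int) (modulus : Int) : Prop := modulus ≠ 0
instance (limit : Int) (modulus : Int) : Decidable (Pre_partition_function limit modulus) := by
  unfold Pre_partition_function; infer_instance

def pvWitness_partition_function : Int × Int := (0, 5)

def Spec_partition_function (limit : Int) (modulus : Int) (out : Int) : Prop :=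
  out = partition_function_alt limit modulus
instance (limit : Int) (modulus : Int) (out : Int) : Decidable (Spec_partition_function limit modulus out) := by
  unfold Spec_partition_function; infer_instance

-- ===== CLAIM (what is proved, stated in full; the proofs are below) =====
def Claim_equal_partition_function : Prop :=
  ∀ (limit : Int) (modulus : Int), Dom_partition_function limit modulus →
    Pre_partition_function limit modulus →
    Spec_partition_function limit modulus (partition_function limit modulus)

-- ===== LEMMAS AND PROOFS =====

-- proof-only helpers: the signed term and the raw (un-modded) partial sums of the recurrence
def pvSign (k : Int) : Int := if PySem.Int.mod k 2 = 0 then -1 else 1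
def pvTerm (n : Int) (parts : List Int) (p : Int) : Int := parts.getD (n - p).toNat 0

def pvS1 (n : Int) (parts : List Int) : Int → Nat → Int
  | _, 0 => 0
  | k, fuel+1 =>
    if pentagonal_number k > n then 0
    else pvSign k * pvTerm n parts (pentagonal_number k) + pvS1 n parts (k + 1) fuel

def pvHS (n : Int) (parts : List Int) : Int → Nat → Int
  | _, 0 => 0
  | k, fuel+1 =>
    if pentagonal_number k + k > n then 0
    else pvSign k * pvTerm n parts (pentagonal_number k + k) + pvHS n parts (k + 1) fuel

-- the reference sequence of residues A computes: pvEnt n = A's partitions list after entry n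
def pvEnt (modulus : Int) : Nat → List Int
  | 0 => [1]
  | n+1 =>
    pvEnt modulus n ++
      [PySem.Int.mod (pvS1 ((n : Int) + 1) (pvEnt modulus n) 1 (n + 3) +
                      pvHS ((n : Int) + 1) (pvEnt modulus n) 1 (n + 3)) modulus]

def pvV (modulus : Int) (j : Nat) : Int := (pvEnt modulus j).getD j 0

-- first index in (a, a+fuel] whose residue is zero
def pvFZ (modulus : Int) : Nat → Nat → Option Nat
  | _, 0 => none
  | a, s+1 => if pvV modulus (a + 1) = 0 then some (a + 1) else pvFZ modulus (a + 1) s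

-- reference for the scatter loop's pointwise effect on slot t
def pvAdd (bound : Int) (m : Nat) (p : Int) (t : Nat) : Int → Nat → Int
  | _, 0 => 0
  | k, fuel+1 =>
    if pentagonal_number k > bound then 0
    else
      (if m + (pentagonal_number k).toNat = t then pvSign k * p else 0) +
      ((if pentagonal_number k + k ≤ bound ∧ m + (pentagonal_number k + k).toNat = t
        then pvSign k * p else 0) +
       pvAdd bound m p t (k + 1) fuel)

-- cumulative contributions pushed into slot t by positions 0..m-1
def pvCC (modulus : Int) (N : Nat) (t : Nat) : Nat → Int
  | 0 => 0
  | m+1 => pvCC modulus N t m + pvAdd ((N : Int) - (m : Int)) m (pvV modulus m) t 1 (N + 2)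

-- spec-level scan of one horizon
def pvScan (modulus : Int) (N : Nat) : Nat → Nat → Option Int
  | _, 0 => none
  | m, fuel+1 =>
    if m > N then none
    else if m ≠ 0 ∧ pvV modulus m = 0 then some (m : Int)
    else pvScan modulus N (m + 1) fuel

lemma pvmod_eq (a b : Int) : PySem.Int.mod a b = Int.fmod a b := rfl

lemma pvmod_add (x y m : Int) :
    PySem.Int.mod (PySem.Int.mod x m + y) m = PySem.Int.mod (x + y) m :=
  Int.fmod_add_fmod x m y

lemma pent_two_mul (k : Int) : 2 * pentagonal_number k = k * (3 * k - 1) := by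
  have hd : (2:Int) ∣ k * (3 * k - 1) := by
    rcases Int.even_or_odd k with ⟨t, ht⟩ | ⟨t, ht⟩
    · exact Dvd.dvd.mul_right ⟨t, by omega⟩ _
    · exact Dvd.dvd.mul_left ⟨3 * t + 1, by omega⟩ _
  unfold pentagonal_number
  rw [PySem.Int.floordiv_eq_ediv_of_pos (by norm_num)]
  omega

lemma pent_ge (k : Int) (hk : 1 ≤ k) : k ≤ pentagonal_number k := by
  nlinarith [pent_two_mul k]

lemma pent_neg (k : Int) : pentagonal_number (-k) = pentagonal_number k + k := by
  have h : 2 * pentagonal_number (-k) = 2 * (pentagonal_number k + k) := by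
    linear_combination pent_two_mul (-k) - pent_two_mul k
  omega

lemma pent_succ (k : Int) : pentagonal_number (k + 1) = pentagonal_number k + 3 * k + 1 := by
  have h : 2 * pentagonal_number (k + 1) = 2 * (pentagonal_number k + 3 * k + 1) := by
    linear_combination pent_two_mul (k + 1) - pent_two_mul k
  omega

lemma pvSign_succ (k : Int) : pvSign (k + 1) = -pvSign k := by
  unfold pvSign
  rcases Int.even_or_odd k with ⟨t, ht⟩ | ⟨t, ht⟩
  · rw [show k = 2 * t by omega, show 2 * t + 1 = 1 + 2 * t by ring]
    rw [show PySem.Int.mod (2 * t) 2 = 0 from by simp [pvmod_eq],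
      show PySem.Int.mod (1 + 2 * t) 2 = 1 from by simp [pvmod_eq, Int.add_mul_fmod_self_left]]
    norm_num
  · rw [show k = 1 + 2 * t by omega, show 1 + 2 * t + 1 = 2 * (t + 1) by ring]
    rw [show PySem.Int.mod (2 * (t + 1)) 2 = 0 from by simp [pvmod_eq],
      show PySem.Int.mod (1 + 2 * t) 2 = 1 from by simp [pvmod_eq, Int.add_mul_fmod_self_left]]
    norm_num

lemma pent_mono (a b : Int) (ha : 1 ≤ a) (hab : a ≤ b) :
    pentagonal_number a ≤ pentagonal_number b := by
  nlinarith [pent_two_mul a, pent_two_mul b]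

lemma penth_mono (a b : Int) (ha : 1 ≤ a) (hab : a ≤ b) :
    pentagonal_number a + a ≤ pentagonal_number b + b := by
  nlinarith [pent_two_mul a, pent_two_mul b]

lemma pvSign_neg (k : Int) : pvSign (-k) = pvSign k := by
  unfold pvSign
  have h : PySem.Int.mod (-k) 2 = PySem.Int.mod k 2 := by simp
  rw [h]

lemma pvS1_zero (n : Int) (parts : List Int) (k : Int) (fuel : Nat)
    (h : pentagonal_number k > n) : pvS1 n parts k fuel = 0 := by
  cases fuel <;> simp [pvS1, h]

lemma pvHS_zero (n : Int) (parts : List Int) (k : Int) (fuel : Nat)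
    (h : pentagonal_number k + k > n) : pvHS n parts k fuel = 0 := by
  cases fuel <;> simp [pvHS, h]

-- length / lookup facts for the reference sequence
lemma pvEnt_length (modulus : Int) (n : Nat) : (pvEnt modulus n).length = n + 1 := by
  induction n with
  | zero => rfl
  | succ n ih => simp [pvEnt, ih]

lemma getD_set_eq (c : List Int) (i t : Nat) (x : Int) (hi : i < c.length) :
    (c.set i x).getD t 0 = (if i = t then x else c.getD t 0) := by
  simp only [List.getD_eq_getElem?_getD, List.getElem?_set]
  split_ifs with h <;> simp [h, hi]

lemma pvV_zero (modulus : Int) : pvV modulus 0 = 1 := rfl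

lemma pvV_succ (modulus : Int) (n : Nat) :
    pvV modulus (n + 1) =
      PySem.Int.mod (pvS1 ((n : Int) + 1) (pvEnt modulus n) 1 (n + 3) +
                     pvHS ((n : Int) + 1) (pvEnt modulus n) 1 (n + 3)) modulus := by
  show (pvEnt modulus (n+1)).getD (n+1) 0 = _
  have hl := pvEnt_length modulus n
  simp only [pvEnt]
  rw [show n + 1 = (pvEnt modulus n).length by omega]
  simp [List.getD_eq_getElem?_getD]

lemma getD_pvEnt (modulus : Int) (n j : Nat) (hj : j ≤ n) :
    (pvEnt modulus n).getD j 0 = pvV modulus j := by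
  induction n with
  | zero => interval_cases j; rfl
  | succ n ih =>
    rcases Nat.lt_or_ge j (n + 1) with h | h
    · have hl := pvEnt_length modulus n
      have he : (pvEnt modulus (n+1)).getD j 0 = (pvEnt modulus n).getD j 0 := by
        simp only [pvEnt]
        simp [List.getD_eq_getElem?_getD,
          List.getElem?_append_left (by omega : j < (pvEnt modulus n).length)]
      rw [he, ih (by omega)]
    · have : j = n + 1 := by omega
      subst this; rfl

-- ===== A-side: the entry A computes at index n equals mod (S1 + HS) =====

lemma pvA_loop1_eq (m n : Int) (parts : List Int) :
    ∀ (fuel : Nat) (k acc : Int), 1 ≤ k → n < k + fuel →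
      pvA_loop1 m n parts k acc fuel =
        if pentagonal_number k > n then acc
        else PySem.Int.mod (acc + pvS1 n parts k fuel) m := by
  intro fuel
  induction fuel with
  | zero =>
    intro k acc hk hlt
    have hg : pentagonal_number k > n := lt_of_lt_of_le (by omega) (pent_ge k hk)
    simp [pvA_loop1, hg]
  | succ fuel ih =>
    intro k acc hk hlt
    by_cases hg : pentagonal_number k > n
    · simp [pvA_loop1, hg]
    · simp only [pvA_loop1, hg, if_neg, not_false_iff]
      rw [ih (k + 1) _ (by omega) (by omega)]
      by_cases hg2 : pentagonal_number (k + 1) > n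
      · rw [if_pos hg2]
        simp only [pvS1, if_neg hg, pvSign, pvTerm]
        rw [pvS1_zero n parts (k + 1) fuel hg2]
        congr 1; ring
      · rw [if_neg hg2]
        simp only [pvS1, if_neg hg, pvSign, pvTerm, pvmod_eq, Int.fmod_add_fmod]
        congr 1; ring

lemma pvA_loop2_eq (m n : Int) (parts : List Int) :
    ∀ (fuel : Nat) (j acc : Int), 1 ≤ j → n < j + fuel →
      pvA_loop2 m n parts (-j) acc fuel =
        if pentagonal_number j + j > n then acc
        else PySem.Int.mod (acc + pvHS n parts j fuel) m := by
  intro fuel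
  induction fuel with
  | zero =>
    intro j acc hj hlt
    have hp := pent_ge j hj
    have hg : pentagonal_number j + j > n := by omega
    simp [pvA_loop2, hg]
  | succ fuel ih =>
    intro j acc hj hlt
    have hs : (if PySem.Int.mod (-j) 2 = 0 then (-1:Int) else 1) = pvSign j := pvSign_neg j
    by_cases hg : pentagonal_number j + j > n
    · have hg' : pentagonal_number (-j) > n := by rw [pent_neg]; exact hg
      rw [pvA_loop2]
      simp only [if_pos hg', if_pos hg]
    · have hg' : ¬pentagonal_number (-j) > n := by rw [pent_neg]; exact hg
      simp only [pvA_loop2, if_neg hg']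
      rw [show -j - 1 = -(j + 1) by ring, ih (j + 1) _ (by omega) (by omega)]
      by_cases hg2 : pentagonal_number (j + 1) + (j + 1) > n
      · rw [if_pos hg2, if_neg hg]
        simp only [pvHS, if_neg hg]
        rw [pvHS_zero n parts (j + 1) fuel hg2]
        simp only [pent_neg, pvTerm, hs]
        congr 1; ring
      · rw [if_neg hg2, if_neg hg]
        simp only [pvHS, if_neg hg, pent_neg, pvTerm, pvmod_add, hs]
        congr 1; ring

lemma pvA_entry (m n : Int) (parts : List Int) (hn : 1 ≤ n) :
    pvA_loop2 m n parts (-1) (pvA_loop1 m n parts 1 0 (n.toNat + 2)) (n.toNat + 2) =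
      PySem.Int.mod (pvS1 n parts 1 (n.toNat + 2) + pvHS n parts 1 (n.toNat + 2)) m := by
  rw [pvA_loop1_eq m n parts (n.toNat + 2) 1 0 le_rfl (by push_cast; omega),
    if_neg (by have : pentagonal_number 1 = 1 := rfl; omega),
    pvA_loop2_eq m n parts (n.toNat + 2) 1 _ le_rfl (by push_cast; omega)]
  by_cases hg : pentagonal_number 1 + 1 > n
  · rw [if_pos hg, pvHS_zero n parts 1 (n.toNat + 2) hg]
    rw [add_zero]; congr 1; ring
  · rw [if_neg hg, pvmod_add]; congr 1; ring

lemma pvA_main_eq (modulus : Int) :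
    ∀ (fuel n : Nat),
      pvA_main modulus (pvEnt modulus n) ((n : Int) + 1) fuel =
        (match pvFZ modulus n fuel with | some j => (j : Int) | none => -1) := by
  intro fuel
  induction fuel with
  | zero => intro n; rfl
  | succ fuel ih =>
    intro n
    have htn : ((n : Int) + 1).toNat = n + 1 := by omega
    have hent := pvA_entry modulus ((n : Int) + 1) (pvEnt modulus n) (by omega)
    rw [htn] at hent
    simp only [pvA_main, pvFZ, htn, hent]
    rw [show n + 1 + 2 = n + 3 from rfl,
      show PySem.Int.mod (pvS1 ((n : Int) + 1) (pvEnt modulus n) 1 (n + 3) +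
          pvHS ((n : Int) + 1) (pvEnt modulus n) 1 (n + 3)) modulus = pvV modulus (n+1) from
        (pvV_succ modulus n).symm]
    by_cases hz : pvV modulus (n + 1) = 0
    · simp only [hz, if_pos, if_true]
      push_cast; ring
    · simp only [hz, if_neg, not_false_iff, if_false]
      have hrec : pvEnt modulus n ++ [pvV modulus (n+1)] = pvEnt modulus (n+1) := by
        rw [pvV_succ]; rfl
      rw [hrec, show (n : Int) + 1 + 1 = ((n + 1 : Nat) : Int) + 1 by push_cast; ring, ih (n + 1)]

-- ===== B-side: scatter effect, pass invariant, scan =====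

lemma pvB_scat_length (bound : Int) (m : Nat) :
    ∀ (fuel : Nat) (k g sp : Int) (c : List Int),
      (pvB_scat bound m k g sp c fuel).length = c.length := by
  intro fuel
  induction fuel with
  | zero => intro k g sp c; rfl
  | succ fuel ih =>
    intro k g sp c
    simp only [pvB_scat]
    split_ifs with hg hh <;> simp [ih]

lemma pvB_scat_getD (bound : Int) (m : Nat) (p : Int) :
    ∀ (fuel : Nat) (k g sp : Int) (c : List Int), 1 ≤ k → g = pentagonal_number k →
      sp = pvSign k * p → (m : Int) + bound < (c.length : Int) →
      ∀ t, t < c.length →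
        (pvB_scat bound m k g sp c fuel).getD t 0 = c.getD t 0 + pvAdd bound m p t k fuel := by
  intro fuel
  induction fuel with
  | zero => intro k g sp c _ _ _ _ t _; simp [pvB_scat, pvAdd]
  | succ fuel ih =>
    intro k g sp c hk hgdef hspdef hlen t ht
    subst hgdef; subst hspdef
    by_cases hg : pentagonal_number k > bound
    · simp only [pvB_scat, pvAdd, if_pos hg]
      ring
    · have hg1 : 1 ≤ pentagonal_number k := le_trans hk (pent_ge k hk)
      have hi1 : m + (pentagonal_number k).toNat < c.length := by omega
      simp only [pvB_scat, pvAdd, if_neg hg]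
      set g := pentagonal_number k with hgdef
      set c1 := c.set (m + g.toNat) (c.getD (m + g.toNat) 0 + pvSign k * p) with hc1
      have hc1len : c1.length = c.length := by simp [hc1]
      have hnext : ∀ c' : List Int, c'.length = c.length →
          (pvB_scat bound m (k + 1) (g + 3 * k + 1) (-(pvSign k * p)) c' fuel).getD t 0 =
            c'.getD t 0 + pvAdd bound m p t (k + 1) fuel := by
        intro c' hlen'
        exact ih (k + 1) (g + 3 * k + 1) (-(pvSign k * p)) c' (by omega)
          (by rw [hgdef, ← pent_succ]) (by rw [pvSign_succ]; ring)
          (by rw [hlen']; exact hlen) t (by rw [hlen']; exact ht)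
      by_cases hh : g + k ≤ bound
      · have hi2 : m + (g + k).toNat < c1.length := by rw [hc1len]; omega
        rw [if_pos hh]
        rw [hnext _ (by rw [List.length_set, hc1len])]
        rw [getD_set_eq c1 _ t _ hi2, hc1, getD_set_eq c _ t _ hi1, getD_set_eq c _ _ _ hi1]
        by_cases e2 : m + (g + k).toNat = t
        · by_cases e1 : m + g.toNat = t
          · exact absurd (e1.trans e2.symm) (by omega)
          · rw [if_pos e2, if_neg (by omega : ¬ m + g.toNat = m + (g + k).toNat),
              if_neg e1, if_pos ⟨hh, e2⟩, e2]
            ring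
        · rw [if_neg e2, if_neg (fun hc => e2 hc.2 : ¬(g + k ≤ bound ∧ m + (g + k).toNat = t))]
          by_cases e1 : m + g.toNat = t
          · rw [if_pos e1, if_pos e1, e1]; ring
          · rw [if_neg e1, if_neg e1]; ring
      · rw [if_neg hh]
        rw [hnext _ hc1len]
        rw [hc1, getD_set_eq c _ t _ hi1]
        rw [if_neg (fun hc => hh hc.1 : ¬(g + k ≤ bound ∧ m + (g + k).toNat = t))]
        by_cases e1 : m + g.toNat = t
        · rw [if_pos e1, if_pos e1, e1]; ring
        · rw [if_neg e1, if_neg e1]; ring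

-- ===== Finset-sum views of the fueled recursions =====

lemma pvS1_sum (n : Int) (parts : List Int) :
    ∀ (fuel : Nat) (k0 : Int), 1 ≤ k0 →
      pvS1 n parts k0 fuel =
        ∑ i ∈ Finset.range fuel,
          (if pentagonal_number (k0 + (i : Int)) ≤ n
           then pvSign (k0 + (i : Int)) * pvTerm n parts (pentagonal_number (k0 + (i : Int)))
           else 0) := by
  intro fuel
  induction fuel with
  | zero => intro k0 _; simp [pvS1]
  | succ fuel ih =>
    intro k0 hk0
    by_cases hg : pentagonal_number k0 > n
    · rw [pvS1_zero n parts k0 _ hg, eq_comm]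
      apply Finset.sum_eq_zero
      intro i _
      have := pent_mono k0 (k0 + (i : Int)) hk0 (by omega)
      rw [if_neg (by omega)]
    · rw [pvS1, if_neg hg, Finset.sum_range_succ', ih (k0 + 1) (by omega)]
      rw [Finset.sum_congr rfl (fun i _ => by
        rw [show (k0 + 1 + (i : Int)) = (k0 + ((i : Nat) + 1 : Nat) : Int) by push_cast; ring])]
      simp only [Nat.cast_zero, add_zero]
      rw [if_pos (by omega)]
      ring

lemma pvHS_sum (n : Int) (parts : List Int) :
    ∀ (fuel : Nat) (k0 : Int), 1 ≤ k0 →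
      pvHS n parts k0 fuel =
        ∑ i ∈ Finset.range fuel,
          (if pentagonal_number (k0 + (i : Int)) + (k0 + (i : Int)) ≤ n
           then pvSign (k0 + (i : Int)) *
                pvTerm n parts (pentagonal_number (k0 + (i : Int)) + (k0 + (i : Int)))
           else 0) := by
  intro fuel
  induction fuel with
  | zero => intro k0 _; simp [pvHS]
  | succ fuel ih =>
    intro k0 hk0
    by_cases hg : pentagonal_number k0 + k0 > n
    · rw [pvHS_zero n parts k0 _ hg, eq_comm]
      apply Finset.sum_eq_zero
      intro i _
      have := penth_mono k0 (k0 + (i : Int)) hk0 (by omega)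
      rw [if_neg (by omega)]
    · rw [pvHS, if_neg hg, Finset.sum_range_succ', ih (k0 + 1) (by omega)]
      rw [Finset.sum_congr rfl (fun i _ => by
        rw [show (k0 + 1 + (i : Int)) = (k0 + ((i : Nat) + 1 : Nat) : Int) by push_cast; ring])]
      simp only [Nat.cast_zero, add_zero]
      rw [if_pos (by omega)]
      ring

lemma pvAdd_zero (bound : Int) (m : Nat) (p : Int) (t : Nat) (k : Int) (fuel : Nat)
    (h : pentagonal_number k > bound) : pvAdd bound m p t k fuel = 0 := by
  cases fuel <;> simp [pvAdd, h]

lemma pvAdd_sum (bound : Int) (m : Nat) (p : Int) (t : Nat) :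
    ∀ (fuel : Nat) (k0 : Int), 1 ≤ k0 →
      pvAdd bound m p t k0 fuel =
        ∑ i ∈ Finset.range fuel,
          (if pentagonal_number (k0 + (i : Int)) ≤ bound
           then (if m + (pentagonal_number (k0 + (i : Int))).toNat = t
                 then pvSign (k0 + (i : Int)) * p else 0) +
                (if pentagonal_number (k0 + (i : Int)) + (k0 + (i : Int)) ≤ bound ∧
                    m + (pentagonal_number (k0 + (i : Int)) + (k0 + (i : Int))).toNat = t
                 then pvSign (k0 + (i : Int)) * p else 0)
           else 0) := by
  intro fuel
  induction fuel with
  | zero => intro k0 _; simp [pvAdd]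
  | succ fuel ih =>
    intro k0 hk0
    by_cases hg : pentagonal_number k0 > bound
    · rw [pvAdd_zero bound m p t k0 _ hg, eq_comm]
      apply Finset.sum_eq_zero
      intro i _
      have := pent_mono k0 (k0 + (i : Int)) hk0 (by omega)
      rw [if_neg (by omega)]
    · rw [pvAdd, if_neg hg, Finset.sum_range_succ', ih (k0 + 1) (by omega)]
      rw [Finset.sum_congr rfl (fun i _ => by
        rw [show (k0 + 1 + (i : Int)) = (k0 + ((i : Nat) + 1 : Nat) : Int) by push_cast; ring])]
      simp only [Nat.cast_zero, add_zero]
      rw [if_pos (show pentagonal_number k0 ≤ bound by omega)]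
      ring

lemma pvCC_sum (modulus : Int) (N t : Nat) (mm : Nat) :
    pvCC modulus N t mm =
      ∑ m' ∈ Finset.range mm,
        pvAdd ((N : Int) - (m' : Int)) m' (pvV modulus m') t 1 (N + 2) := by
  induction mm with
  | zero => simp [pvCC]
  | succ mm ih => rw [pvCC, ih, Finset.sum_range_succ]

-- ===== KEY: scattered contributions at slot n+1 = A's gathered sum there =====

lemma pvKey_raw (modulus : Int) (N n : Nat) (hN : n + 1 ≤ N) :
    pvCC modulus N (n + 1) (n + 1) =
      pvS1 ((n : Int) + 1) (pvEnt modulus n) 1 (n + 3) +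
      pvHS ((n : Int) + 1) (pvEnt modulus n) 1 (n + 3) := by
  have hS1 : pvS1 ((n : Int) + 1) (pvEnt modulus n) 1 (n + 3) =
      ∑ i ∈ Finset.range (N + 2),
        (if pentagonal_number (1 + (i : Int)) ≤ (n : Int) + 1
         then pvSign (1 + (i : Int)) *
              pvTerm ((n : Int) + 1) (pvEnt modulus n) (pentagonal_number (1 + (i : Int)))
         else 0) := by
    rw [pvS1_sum ((n : Int) + 1) (pvEnt modulus n) (n + 3) 1 le_rfl]
    apply Finset.sum_subset (Finset.range_subset_range.mpr (show n + 3 ≤ N + 2 by omega))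
    intro i _ hi
    simp only [Finset.mem_range, not_lt] at hi
    have hp := pent_ge (1 + (i : Int)) (by omega)
    rw [if_neg (by omega)]
  have hHS : pvHS ((n : Int) + 1) (pvEnt modulus n) 1 (n + 3) =
      ∑ i ∈ Finset.range (N + 2),
        (if pentagonal_number (1 + (i : Int)) + (1 + (i : Int)) ≤ (n : Int) + 1
         then pvSign (1 + (i : Int)) *
              pvTerm ((n : Int) + 1) (pvEnt modulus n)
                (pentagonal_number (1 + (i : Int)) + (1 + (i : Int)))
         else 0) := by
    rw [pvHS_sum ((n : Int) + 1) (pvEnt modulus n) (n + 3) 1 le_rfl]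
    apply Finset.sum_subset (Finset.range_subset_range.mpr (show n + 3 ≤ N + 2 by omega))
    intro i _ hi
    simp only [Finset.mem_range, not_lt] at hi
    have hp := pent_ge (1 + (i : Int)) (by omega)
    rw [if_neg (by omega)]
  have hrow : ∀ m' ∈ Finset.range (n + 1),
      pvAdd ((N : Int) - (m' : Int)) m' (pvV modulus m') (n + 1) 1 (N + 2) =
        ∑ i ∈ Finset.range (N + 2),
          ((if m' + (pentagonal_number (1 + (i : Int))).toNat = n + 1
            then pvSign (1 + (i : Int)) * pvV modulus m' else 0) +
           (if m' + (pentagonal_number (1 + (i : Int)) + (1 + (i : Int))).toNat = n + 1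
            then pvSign (1 + (i : Int)) * pvV modulus m' else 0)) := by
    intro m' hm'
    simp only [Finset.mem_range] at hm'
    rw [pvAdd_sum ((N : Int) - (m' : Int)) m' (pvV modulus m') (n + 1) (N + 2) 1 le_rfl]
    apply Finset.sum_congr rfl
    intro i _
    have hk1 : (1 : Int) ≤ 1 + (i : Int) := by omega
    have hg1 : 1 ≤ pentagonal_number (1 + (i : Int)) := le_trans hk1 (pent_ge _ hk1)
    by_cases hguard : pentagonal_number (1 + (i : Int)) ≤ (N : Int) - (m' : Int)
    · rw [if_pos hguard]
      congr 1
      by_cases hcond : m' + (pentagonal_number (1 + (i : Int)) + (1 + (i : Int))).toNat = n + 1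
      · rw [if_pos ⟨by omega, hcond⟩, if_pos hcond]
      · rw [if_neg (fun hc => hcond hc.2), if_neg hcond]
    · rw [if_neg hguard, if_neg (by omega), if_neg (by omega)]
      norm_num
  rw [pvCC_sum, Finset.sum_congr rfl hrow, Finset.sum_comm, hS1, hHS, ← Finset.sum_add_distrib]
  apply Finset.sum_congr rfl
  intro i _
  rw [Finset.sum_add_distrib]
  have hk1 : (1 : Int) ≤ 1 + (i : Int) := by omega
  have hg1 : 1 ≤ pentagonal_number (1 + (i : Int)) := le_trans hk1 (pent_ge _ hk1)
  congr 1
  · by_cases hgle : pentagonal_number (1 + (i : Int)) ≤ (n : Int) + 1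
    · rw [Finset.sum_eq_single_of_mem (n + 1 - (pentagonal_number (1 + (i : Int))).toNat)
        (Finset.mem_range.mpr (by omega))
        (fun x hx hne => by
          simp only [Finset.mem_range] at hx
          rw [if_neg (by omega)])]
      rw [if_pos (by omega : n + 1 - (pentagonal_number (1 + (i : Int))).toNat +
            (pentagonal_number (1 + (i : Int))).toNat = n + 1), if_pos hgle]
      unfold pvTerm
      rw [show (((n : Int) + 1) - pentagonal_number (1 + (i : Int))).toNat =
          n + 1 - (pentagonal_number (1 + (i : Int))).toNat by omega]
      rw [getD_pvEnt modulus n _ (by omega)]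
    · rw [if_neg hgle]
      apply Finset.sum_eq_zero
      intro m' hm'
      simp only [Finset.mem_range] at hm'
      rw [if_neg (by omega)]
  · by_cases hhle : pentagonal_number (1 + (i : Int)) + (1 + (i : Int)) ≤ (n : Int) + 1
    · rw [Finset.sum_eq_single_of_mem
        (n + 1 - (pentagonal_number (1 + (i : Int)) + (1 + (i : Int))).toNat)
        (Finset.mem_range.mpr (by omega))
        (fun x hx hne => by
          simp only [Finset.mem_range] at hx
          rw [if_neg (by omega)])]
      rw [if_pos (by omega : n + 1 - (pentagonal_number (1 + (i : Int)) + (1 + (i : Int))).toNat +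
            (pentagonal_number (1 + (i : Int)) + (1 + (i : Int))).toNat = n + 1), if_pos hhle]
      unfold pvTerm
      rw [show (((n : Int) + 1) - (pentagonal_number (1 + (i : Int)) + (1 + (i : Int)))).toNat =
          n + 1 - (pentagonal_number (1 + (i : Int)) + (1 + (i : Int))).toNat by omega]
      rw [getD_pvEnt modulus n _ (by omega)]
    · rw [if_neg hhle]
      apply Finset.sum_eq_zero
      intro m' hm'
      simp only [Finset.mem_range] at hm'
      rw [if_neg (by omega)]

lemma pvKey (modulus : Int) (N m : Nat) (h1 : 1 ≤ m) (hmN : m ≤ N) :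
    PySem.Int.mod (pvCC modulus N m m) modulus = pvV modulus m := by
  obtain ⟨n, rfl⟩ : ∃ n, m = n + 1 := ⟨m - 1, by omega⟩
  rw [pvKey_raw modulus N n (by omega), pvV_succ]

-- ===== pass = scan, scan = first-zero =====

lemma pvB_pass_eq (modulus : Int) (N : Nat) :
    ∀ (fuel m : Nat) (c : List Int), c.length = N + 1 →
      (∀ t, m ≤ t → t ≤ N → c.getD t 0 = pvCC modulus N t m) →
      pvB_pass N modulus m c fuel = pvScan modulus N m fuel := by
  intro fuel
  induction fuel with
  | zero => intro m c _ _; rfl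
  | succ fuel ih =>
    intro m c hc hinv
    by_cases hm : m > N
    · simp only [pvB_pass, pvScan, if_pos hm]
    · simp only [pvB_pass, pvScan, if_neg hm]
      have hp : (if m = 0 then 1 else PySem.Int.mod (c.getD m 0) modulus) = pvV modulus m := by
        by_cases h0 : m = 0
        · subst h0; rw [if_pos rfl, pvV_zero]
        · rw [if_neg h0, hinv m le_rfl (by omega), pvKey modulus N m (by omega) (by omega)]
      rw [hp]
      by_cases hz : m ≠ 0 ∧ pvV modulus m = 0
      · rw [if_pos hz, if_pos hz]
      · rw [if_neg hz, if_neg hz]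
        apply ih (m + 1)
        · rw [pvB_scat_length, hc]
        · intro t ht1 ht2
          rw [pvB_scat_getD ((N : Int) - (m : Int)) m (pvV modulus m) (N + 2) 1 1
            (pvV modulus m) c le_rfl rfl (by norm_num [pvSign, pvmod_eq])
            (by rw [hc]; push_cast; omega) t (by omega)]
          rw [hinv t (by omega) ht2]
          rfl

lemma pvScan_eq (modulus : Int) (N : Nat) :
    ∀ (fuel a : Nat), 1 ≤ a → a + fuel = N + 2 →
      pvScan modulus N a fuel = Option.map (fun j : Nat => (j : Int)) (pvFZ modulus (a - 1) (N + 1 - a)) := by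
  intro fuel
  induction fuel with
  | zero =>
    intro a ha haf
    rw [show N + 1 - a = 0 by omega]
    rfl
  | succ fuel ih =>
    intro a ha haf
    by_cases hm : a > N
    · rw [show N + 1 - a = 0 by omega]
      simp only [pvScan, if_pos hm]
      rfl
    · simp only [pvScan, if_neg hm]
      rw [show N + 1 - a = (N - a) + 1 by omega]
      simp only [pvFZ]
      rw [show a - 1 + 1 = a by omega]
      by_cases hz : pvV modulus a = 0
      · rw [if_pos ⟨by omega, hz⟩, if_pos hz]
        rfl
      · rw [if_neg (fun hc => hz hc.2), if_neg hz, ih (a + 1) (by omega) (by omega)]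
        rw [show a + 1 - 1 = a by omega, show N + 1 - (a + 1) = N - a by omega]

lemma pvB_pass_full (modulus : Int) (N : Nat) :
    pvB_pass N modulus 0 (List.replicate (N + 1) 0) (N + 2) =
      Option.map (fun j : Nat => (j : Int)) (pvFZ modulus 0 N) := by
  rw [pvB_pass_eq modulus N (N + 2) 0 (List.replicate (N + 1) 0) (by simp)
    (fun t _ ht2 => by
      have hrep : (List.replicate (N + 1) (0 : Int)).getD t 0 = 0 := by
        simp [List.getD_eq_getElem?_getD, List.getElem?_replicate, ht2]
      rw [hrep]; rfl)]
  rw [show pvScan modulus N 0 (N + 2) = pvScan modulus N 1 (N + 1) from by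
    rw [pvScan]
    norm_num]
  rw [pvScan_eq modulus N (N + 1) 1 le_rfl (by omega)]
  norm_num

lemma pvFZ_add (modulus : Int) :
    ∀ (s t a : Nat),
      pvFZ modulus a (s + t) =
        (match pvFZ modulus a s with
         | some j => some j
         | none => pvFZ modulus (a + s) t) := by
  intro s
  induction s with
  | zero =>
    intro t a
    show pvFZ modulus a (0 + t) = pvFZ modulus (a + 0) t
    rw [Nat.zero_add, Nat.add_zero]
  | succ s ih =>
    intro t a
    rw [show s + 1 + t = (s + t) + 1 by omega]
    simp only [pvFZ]
    by_cases hz : pvV modulus (a + 1) = 0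
    · rw [if_pos hz, if_pos hz]
    · rw [if_neg hz, if_neg hz, ih t (a + 1)]
      rw [show a + (s + 1) = a + 1 + s by omega]

lemma pvB_main_step (modulus : Int) (N fuel : Nat) :
    pvB_main modulus N (fuel + 1) =
      (match Option.map (fun j : Nat => (j : Int)) (pvFZ modulus 0 N) with
       | some z => z
       | none => pvB_main modulus (2 * N) fuel) := by
  rw [← pvB_pass_full]
  rfl

lemma pvB_main_eq (modulus : Int) :
    ∀ (f N : Nat),
      pvB_main modulus N (f + 1) =
        (match pvFZ modulus 0 (N * 2 ^ f) with | some j => (j : Int) | none => -1) := by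
  intro f
  induction f with
  | zero =>
    intro N
    rw [pvB_main_step, pow_zero, mul_one]
    cases hfz : pvFZ modulus 0 N <;> rfl
  | succ f ih =>
    intro N
    rw [pvB_main_step]
    have h1 : 1 ≤ 2 ^ (f + 1) := Nat.one_le_two_pow
    have h2 : N ≤ N * 2 ^ (f + 1) := Nat.le_mul_of_pos_right N (by omega)
    have h3 : N * (2 ^ (f + 1) - 1) = N * 2 ^ (f + 1) - N := by
      rw [Nat.mul_sub, Nat.mul_one]
    have hsplit : N * 2 ^ (f + 1) = N + N * (2 ^ (f + 1) - 1) := by omega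
    cases hfz : pvFZ modulus 0 N with
    | some j =>
      rw [hsplit, pvFZ_add modulus N (N * (2 ^ (f + 1) - 1)) 0, hfz]
      rfl
    | none =>
      show pvB_main modulus (2 * N) (f + 1) = _
      rw [ih (2 * N), show 2 * N * 2 ^ f = N * 2 ^ (f + 1) by ring]

-- ===== VERDICT (by name: the statement is the Claim_ definition above) =====
theorem partition_function_spec : Claim_equal_partition_function := by
  intro limit modulus _ _
  unfold Spec_partition_function partition_function partition_function_alt
  have hA := pvA_main_eq modulus 134217728 0
  have hB := pvB_main_eq modulus 23 16
  rw [show ((0 : Nat) : Int) + 1 = 1 by norm_num] at hA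
  rw [show (16 : Nat) * 2 ^ 23 = 134217728 by norm_num] at hB
  rw [show (pvEnt modulus 0) = [1] from rfl] at hA
  rw [hA, hB]
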